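-- pv_equiv track=rewrite | github.com/kaiwk/playground | online_judge/nju/contest-4/3_preserve_arr.py | solve
-- ===== SOURCE A (Python) =====
-- def solve(n, arr):
--     total = 0
--     while arr:
--         i = len(arr)-1
--         total += arr[i]
--         try:
--             arr.remove(arr[i]-1)
--         except ValueError:
--             pass
--         arr.pop()
--     return total
-- ===== SOURCE B (Python) =====
-- def solve(n, arr):
--     # O(len(arr)) amortized: per-value ascending index lists with head pointers,
--     # a dead-mark array and a right-to-left scan, instead of A's repeated
--     # list.remove / list.pop surgery (A is O(len(arr)^2)).
--     # Note: A empties its arr argument in place; B does not mutate arr.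
--     m = len(arr)
--     pos = {}
--     for i, v in enumerate(arr):
--         if v in pos:
--             pos[v].append(i)
--         else:
--             pos[v] = [i]
--     head = {}
--     dead = [False] * m
--     total = 0
--     i = m - 1
--     while i >= 0:
--         if not dead[i]:
--             x = arr[i]
--             total += x
--             dead[i] = True
--             lst = pos.get(x - 1)
--             if lst is not None:
--                 h = head.get(x - 1, 0)
--                 while h < len(lst) and dead[lst[h]]:
--                     h += 1
--                 if h < len(lst):
--                     dead[lst[h]] = True
--                     head[x - 1] = h + 1
--                 else:
--                     head[x - 1] = h
--         i -= 1
--     return total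
-- ===== Notes on version B (the rewrite author's own statement) =====
-- stated objective: faster
-- what changed: B precomputes per-value ascending index lists with head pointers and scans the array once right-to-left over a dead-mark array, instead of A's repeated list.remove/list.pop surgery on a shrinking list.
import Mathlib
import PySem

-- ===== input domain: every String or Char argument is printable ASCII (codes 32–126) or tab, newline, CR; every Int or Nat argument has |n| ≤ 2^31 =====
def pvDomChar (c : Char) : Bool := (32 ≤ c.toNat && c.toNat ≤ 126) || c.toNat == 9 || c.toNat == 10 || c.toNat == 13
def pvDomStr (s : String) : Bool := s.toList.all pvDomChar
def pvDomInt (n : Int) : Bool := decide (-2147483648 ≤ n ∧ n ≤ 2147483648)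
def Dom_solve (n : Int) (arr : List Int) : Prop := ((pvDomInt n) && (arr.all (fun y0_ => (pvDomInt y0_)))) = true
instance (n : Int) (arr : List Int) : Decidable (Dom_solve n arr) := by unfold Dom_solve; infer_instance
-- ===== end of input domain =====

-- B replaces A's O(n^2) repeated list.remove/list.pop surgery by one right-to-left scan with
-- dead marks and per-value index lists with head pointers (objective: faster, asymptotic).
-- Note: Python A empties its arr argument in place; the equivalence is about the return value.

-- ===== PORT A =====
-- try: arr.remove(arr[i]-1) except ValueError: pass
def removeTry (l : List Int) (v : Int) : List Int :=
  match PySem.List.remove? l v with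
  | some l' => l'
  | none => l

-- arr.pop()   (on the empty list Python would raise; A never pops an empty list)
def popLast (l : List Int) : List Int :=
  match PySem.List.pop? l (-1) with
  | some p => p.2
  | none => l

-- termination facts for the while loop (cited in decreasing_by)
theorem length_removeTry_le (l : List Int) (v : Int) : (removeTry l v).length ≤ l.length := by
  unfold removeTry
  cases hr : PySem.List.remove? l v with
  | none => exact le_refl _
  | some l' =>
      have hv : v ∈ l := by
        by_contra hv
        rw [(PySem.List.remove?_eq_none_iff l v).2 hv] at hr; cases hr
      rw [PySem.List.remove?_eq_some_erase l v hv] at hr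
      cases hr
      simpa using List.length_erase_le (l := l) (a := v)

theorem length_popLast_lt (l : List Int) (h : l ≠ []) : (popLast l).length < l.length := by
  unfold popLast
  obtain ⟨r, x, hrx⟩ : ∃ r x, l = r ++ [x] := by
    rcases List.eq_nil_or_concat l with h' | ⟨r, x, h'⟩
    · exact absurd h' h
    · exact ⟨r, x, by simpa using h'⟩
  subst hrx
  rw [PySem.List.pop?_last]
  simp

def solveA_loop (l : List Int) (total : Int) : Int :=
  if hl : l = [] then total
  else
    let x := PySem.List.pyGetD l ((l.length : Int) - 1) 0
    solveA_loop (popLast (removeTry l (x - 1))) (total + x)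
termination_by l.length
decreasing_by
  generalize (PySem.List.pyGetD l ((l.length : Int) - 1) 0 - 1) = v
  have h1 : (removeTry l v).length ≤ l.length := length_removeTry_le l v
  by_cases h2 : removeTry l v = []
  · rw [h2]
    have h0 : 0 < l.length := List.length_pos_iff.2 hl
    simp only [popLast, PySem.List.pop?]
    simp
    omega
  · have := length_popLast_lt (removeTry l v) h2
    omega

def solve (n : Int) (arr : List Int) : Int :=
  solveA_loop arr 0

-- ===== PORT B =====
-- pos: for each value, the ascending list of its indices in arr (Python: dict of lists)
def buildPos : List Int → Nat → PySem.Dict Int (List Nat) → PySem.Dict Int (List Nat)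
  | [], _, pos => pos
  | v :: rest, i, pos =>
      buildPos rest (i + 1)
        (if pos.contains v then pos.insert v (pos.getD v [] ++ [i])
         else pos.insert v [i])

-- while h < len(lst) and dead[lst[h]]: h += 1   (indices are in range by construction)
def skipDead (lst : List Nat) (dead : List Bool) (h : Nat) : Nat :=
  if hh : h < lst.length then
    if dead.getD lst[h] false then skipDead lst dead (h + 1) else h
  else h
termination_by lst.length - h

-- the scan: i runs len(arr)-1, …, 0 (the Nat argument is i+1, so 0 means the loop is done)
def bScan (arr : List Int) (pos : PySem.Dict Int (List Nat)) :
    Nat → List Bool → PySem.Dict Int Nat → Int → Int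
  | 0, _, _, total => total
  | i + 1, dead, head, total =>
    if dead.getD i false then bScan arr pos i dead head total
    else
      let x := arr.getD i 0
      let dead1 := dead.set i true
      match pos.get? (x - 1) with
      | none => bScan arr pos i dead1 head (total + x)
      | some lst =>
          let h := skipDead lst dead1 (head.getD (x - 1) 0)
          if hlen : h < lst.length then
            bScan arr pos i (dead1.set lst[h] true) (head.insert (x - 1) (h + 1)) (total + x)
          else
            bScan arr pos i dead1 (head.insert (x - 1) h) (total + x)

def solve_alt (n : Int) (arr : List Int) : Int :=
  bScan arr (buildPos arr 0 PySem.Dict.empty) arr.length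
    (List.replicate arr.length false) PySem.Dict.empty 0

-- ===== PRECONDITION & SPEC =====
def Spec_solve (n : Int) (arr : List Int) (out : Int) : Prop := out = solve_alt n arr
instance (n : Int) (arr : List Int) (out : Int) : Decidable (Spec_solve n arr out) := by unfold Spec_solve; infer_instance

-- ===== CLAIM (what is proved, stated in full; the proofs are below) =====
def Claim_equal_solve : Prop := ∀ (n : Int) (arr : List Int), Dom_solve n arr → Spec_solve n arr (solve n arr)

-- ===== LEMMAS AND PROOFS =====

-- the elements of arr at indices not yet marked dead, in index order (A's current list)
def resid : List Int → List Bool → List Int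
  | [], _ => []
  | a :: as, [] => a :: resid as []
  | a :: as, d :: ds => if d then resid as ds else a :: resid as ds

-- ascending list of all indices of arr holding value v
def idxs (arr : List Int) (v : Int) : List Nat :=
  (List.range arr.length).filter (fun j => decide (arr.getD j 0 = v))

theorem resid_replicate (arr : List Int) : resid arr (List.replicate arr.length false) = arr := by
  induction arr with
  | nil => rfl
  | cons a as ih => simpa [resid, List.replicate] using ih

theorem dead_mono {dead : List Bool} {p : Nat} (q : Nat)
    (h : dead.getD p false = true) : (dead.set q true).getD p false = true := by
  have hp : p < dead.length := by
    by_contra hp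
    rw [List.getD_eq_getElem?_getD, List.getElem?_eq_none (by omega)] at h
    simp at h
  rw [List.getD_eq_getElem?_getD, List.getElem?_set]
  by_cases hqp : q = p
  · subst hqp; simp [hp]
  · rw [if_neg hqp]; rwa [List.getD_eq_getElem?_getD] at h

theorem res_all_dead (arr : List Int) (dead : List Bool)
    (hlen : dead.length = arr.length)
    (h : ∀ j < arr.length, dead.getD j false = true) : resid arr dead = [] := by
  induction arr generalizing dead with
  | nil => rfl
  | cons a as ih =>
      cases dead with
      | nil => simp at hlen
      | cons d ds =>
          have hd : d = true := by simpa using h 0 (by simp)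
          subst hd
          simp only [resid, if_pos rfl]
          exact ih ds (by simpa using hlen) (fun j hj => by simpa using h (j + 1) (by simp only [List.length_cons]; omega))

theorem res_mem {arr : List Int} {dead : List Bool} {y : Int}
    (h : y ∈ resid arr dead) : y ∈ arr := by
  induction arr generalizing dead with
  | nil => simpa [resid] using h
  | cons a as ih =>
      cases dead with
      | nil =>
          simp only [resid, List.mem_cons] at h
          rcases h with h | h
          · simp [h]
          · exact List.mem_cons_of_mem a (ih h)
      | cons d ds =>
          simp only [resid] at h
          split_ifs at h with hd
          · exact List.mem_cons_of_mem a (ih h)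
          · rcases List.mem_cons.1 h with h | h
            · simp [h]
            · exact List.mem_cons_of_mem a (ih h)

theorem res_none (arr : List Int) (dead : List Bool) (v : Int)
    (h : ∀ j < arr.length, arr.getD j 0 = v → dead.getD j false = true) :
    v ∉ resid arr dead := by
  induction arr generalizing dead with
  | nil => simp [resid]
  | cons a as ih =>
      cases dead with
      | nil =>
          have hav : a ≠ v := by
            intro hav
            have := h 0 (by simp) (by simpa using hav)
            simp at this
          simp only [resid, List.mem_cons, not_or]
          refine ⟨fun hh => hav hh.symm, ?_⟩
          intro hmem
          -- every index of as with value v would need [].getD … = true, impossible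
          have := ih (dead := []) (fun j hj hv => by
            have := h (j + 1) (by simp only [List.length_cons]; omega) (by simpa using hv)
            simpa using this)
          exact this hmem
      | cons d ds =>
          have hrec := ih (dead := ds) (fun j hj hv => by
            have := h (j + 1) (by simp only [List.length_cons]; omega) (by simpa using hv)
            simpa using this)
          simp only [resid]
          split_ifs with hd
          · exact hrec
          · have hav : a ≠ v := by
              intro hav
              have := h 0 (by simp) (by simpa using hav)
              simp [hd] at this
            simp only [List.mem_cons, not_or]
            exact ⟨fun hh => hav hh.symm, hrec⟩

theorem res_last (arr : List Int) (dead : List Bool) (i : Nat)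
    (hlen : dead.length = arr.length) (hi : i < arr.length)
    (halive : dead.getD i false = false)
    (habove : ∀ j, i < j → j < arr.length → dead.getD j false = true) :
    resid arr dead = resid arr (dead.set i true) ++ [arr.getD i 0] := by
  induction arr generalizing dead i with
  | nil => simp at hi
  | cons a as ih =>
      cases dead with
      | nil => simp at hlen
      | cons d ds =>
          cases i with
          | zero =>
              have hd : d = false := by simpa using halive
              subst hd
              have hds : resid as ds = [] := by
                apply res_all_dead as ds (by simpa using hlen)
                intro j hj
                simpa using habove (j + 1) (by omega) (by simp only [List.length_cons]; omega)
              simp [resid, hds]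
          | succ i' =>
              have hlen' : ds.length = as.length := by simpa using hlen
              have hi' : i' < as.length := by simpa using hi
              have halive' : ds.getD i' false = false := by simpa using halive
              have habove' : ∀ j, i' < j → j < as.length → ds.getD j false = true := by
                intro j hj hj'
                simpa using habove (j + 1) (by omega) (by simp only [List.length_cons]; omega)
              have := ih ds i' hlen' hi' halive' habove'
              cases d <;> simp [resid, this]

theorem res_remove (arr : List Int) (dead : List Bool) (j : Nat) (v : Int)
    (hlen : dead.length = arr.length) (hj : j < arr.length)
    (halive : dead.getD j false = false) (hval : arr.getD j 0 = v)
    (hfirst : ∀ k, k < j → arr.getD k 0 = v → dead.getD k false = true) :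
    PySem.List.remove? (resid arr dead) v = some (resid arr (dead.set j true)) := by
  induction arr generalizing dead j with
  | nil => simp at hj
  | cons a as ih =>
      cases dead with
      | nil => simp at hlen
      | cons d ds =>
          cases j with
          | zero =>
              have hd : d = false := by simpa using halive
              have hav : a = v := by simpa using hval
              subst hd; subst hav
              simp [resid]
          | succ j' =>
              have hlen' : ds.length = as.length := by simpa using hlen
              have hj' : j' < as.length := by simpa using hj
              have halive' : ds.getD j' false = false := by simpa using halive
              have hval' : as.getD j' 0 = v := by simpa using hval
              have hfirst' : ∀ k, k < j' → as.getD k 0 = v → ds.getD k false = true := by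
                intro k hk hkv
                simpa using hfirst (k + 1) (by omega) (by simpa using hkv)
              have hrec := ih ds j' hlen' hj' halive' hval' hfirst'
              cases d with
              | true => simpa [resid] using hrec
              | false =>
                  have hav : a ≠ v := by
                    intro hav
                    have := hfirst 0 (by omega) (by simpa using hav)
                    simp at this
                  simp only [resid, Bool.false_eq_true, if_false, List.set_cons_succ]
                  rw [PySem.List.remove?_cons_of_ne _ hav, hrec]
                  rfl

theorem idxs_mem (arr : List Int) (v : Int) (j : Nat) :
    j ∈ idxs arr v ↔ j < arr.length ∧ arr.getD j 0 = v := by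
  simp [idxs]

theorem idxs_sorted (arr : List Int) (v : Int) : (idxs arr v).Pairwise (· < ·) := by
  exact (List.pairwise_lt_range).filter _

theorem buildPos_getD (l : List Int) (i : Nat) (d : PySem.Dict Int (List Nat)) (v : Int) :
    (buildPos l i d).getD v [] =
      d.getD v [] ++ (((List.range l.length).filter (fun k => decide (l.getD k 0 = v))).map (· + i)) := by
  induction l generalizing i d with
  | nil => simp [buildPos]
  | cons a rest ih =>
      have hstep : (if d.contains a then d.insert a (d.getD a [] ++ [i]) else d.insert a [i])
          = d.insert a (d.getD a [] ++ [i]) := by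
        split_ifs with hc
        · rfl
        · rw [PySem.Dict.getD_of_not_contains d [] (by simpa using hc)]
          simp
      rw [buildPos, hstep, ih]
      rw [PySem.Dict.getD_insert]
      have hmap : ∀ L : List Nat, (L.map Nat.succ).map (· + i) = L.map (· + (i + 1)) := by
        intro L
        rw [List.map_map]
        apply List.map_congr_left
        intro k _
        simp [Function.comp]
        omega
      rw [List.length_cons, List.range_succ_eq_map, List.filter_cons]
      have hPsucc : List.filter (fun k => decide ((a :: rest).getD k 0 = v))
            (List.map Nat.succ (List.range rest.length))
          = List.map Nat.succ (List.filter (fun k => decide (rest.getD k 0 = v)) (List.range rest.length)) := by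
        rw [List.filter_map]
        congr 1
      rw [hPsucc]
      by_cases hv : v = a
      · have h0 : decide ((a :: rest).getD 0 0 = v) = true := by simp [hv]
        rw [if_pos hv, h0]
        simp only [if_true, List.map_cons, Nat.zero_add]
        rw [hmap]
        simp [hv, List.append_assoc]
      · have h0 : decide ((a :: rest).getD 0 0 = v) = false := by
          simp only [List.getD_cons_zero]
          simpa using fun hh : a = v => hv hh.symm
        rw [if_neg hv, h0]
        simp only [Bool.false_eq_true, if_false]
        rw [hmap]

theorem buildPos_contains (l : List Int) (i : Nat) (d : PySem.Dict Int (List Nat)) (v : Int) :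
    (buildPos l i d).contains v = (d.contains v || decide (v ∈ l)) := by
  induction l generalizing i d with
  | nil => simp [buildPos]
  | cons a rest ih =>
      rw [buildPos]
      split_ifs with hc <;>
        · rw [ih, PySem.Dict.contains_insert]
          by_cases hva : v = a
          · simp [hva, List.mem_cons]
          · have hba : (v == a) = false := by simpa using hva
            simp [hba, hva, List.mem_cons]

theorem pos_getD_eq (arr : List Int) (v : Int) :
    (buildPos arr 0 PySem.Dict.empty).getD v [] = idxs arr v := by
  rw [buildPos_getD, PySem.Dict.getD_empty]
  simp [idxs]

theorem pos_get?_none (arr : List Int) (v : Int) :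
    (buildPos arr 0 PySem.Dict.empty).get? v = none ↔ v ∉ arr := by
  rw [PySem.Dict.get?_eq_none_iff_contains, buildPos_contains]
  simp

theorem skip_dead (lst : List Nat) (dead : List Bool) (h : Nat) :
    ∀ k, h ≤ k → k < skipDead lst dead h → ∀ hk : k < lst.length,
      dead.getD lst[k] false = true := by
  fun_induction skipDead with
  | case1 h hh hd ih =>
      intro k hk1 hk2 hk
      by_cases hkh : k = h
      · subst hkh; exact hd
      · exact ih k (by omega) hk2 hk
  | case2 h hh hd => intro k hk1 hk2 hk; omega
  | case3 h hh => intro k hk1 hk2 hk; omega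

theorem skip_alive (lst : List Nat) (dead : List Bool) (h : Nat)
    (hlt : skipDead lst dead h < lst.length) :
    dead.getD lst[skipDead lst dead h] false = false := by
  fun_induction skipDead with
  | case1 h hh hd ih => exact ih hlt
  | case2 h hh hd => simpa using hd
  | case3 h hh => omega

-- all entries of pos[v] strictly before head[v] are dead
def HeadInv (arr : List Int) (dead : List Bool) (head : PySem.Dict Int Nat) : Prop :=
  ∀ v k, k < head.getD v 0 → ∀ hk : k < (idxs arr v).length,
    dead.getD (idxs arr v)[k] false = true

theorem remove?_append_singleton (r : List Int) (v x : Int) (hne : v ≠ x) :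
    PySem.List.remove? (r ++ [x]) v = Option.map (· ++ [x]) (PySem.List.remove? r v) := by
  induction r with
  | nil =>
      rw [(PySem.List.remove?_eq_none_iff [] v).2 (by simp)]
      simp only [List.nil_append, Option.map_none]
      rw [PySem.List.remove?_cons_of_ne _ (fun hh => hne hh.symm)]
      rw [(PySem.List.remove?_eq_none_iff [] v).2 (by simp)]
      rfl
  | cons a r ih =>
      by_cases hav : a = v
      · subst hav
        simp [PySem.List.remove?_cons_self]
      · rw [List.cons_append, PySem.List.remove?_cons_of_ne _ hav,
            PySem.List.remove?_cons_of_ne _ hav, ih]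
        cases PySem.List.remove? r v <;> simp

theorem A_step (r : List Int) (x total : Int) :
    solveA_loop (r ++ [x]) total = solveA_loop (removeTry r (x - 1)) (total + x) := by
  have hne : r ++ [x] ≠ [] := by simp
  rw [solveA_loop, dif_neg hne]
  have hxval : PySem.List.pyGetD (r ++ [x]) (((r ++ [x]).length : Int) - 1) 0 = x := by
    rw [PySem.List.pyGetD_eq_getElem _ _
      (by simp only [List.length_append, List.length_cons, List.length_nil]; omega)
      (by simp only [List.length_append, List.length_cons, List.length_nil]; omega)]
    simp only [show (((r ++ [x]).length : Int) - 1).toNat = r.length from by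
      simp only [List.length_append, List.length_cons, List.length_nil]; omega]
    rw [List.getElem_append_right (by omega)]
    simp
  rw [hxval]
  show solveA_loop (popLast (removeTry (r ++ [x]) (x - 1))) (total + x)
      = solveA_loop (removeTry r (x - 1)) (total + x)
  have hrt : removeTry (r ++ [x]) (x - 1) = removeTry r (x - 1) ++ [x] := by
    unfold removeTry
    rw [remove?_append_singleton r (x - 1) x (by omega)]
    cases PySem.List.remove? r (x - 1) <;> simp
  rw [hrt]
  have hpop : popLast (removeTry r (x - 1) ++ [x]) = removeTry r (x - 1) := by
    unfold popLast
    rw [PySem.List.pop?_last]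
  rw [hpop]

theorem main_inv (arr : List Int) (i : Nat) :
    ∀ (dead : List Bool) (head : PySem.Dict Int Nat) (total : Int),
    dead.length = arr.length → i ≤ arr.length →
    (∀ j, i ≤ j → j < arr.length → dead.getD j false = true) →
    HeadInv arr dead head →
    bScan arr (buildPos arr 0 PySem.Dict.empty) i dead head total
      = solveA_loop (resid arr dead) total := by
  induction i with
  | zero =>
      intro dead head total hlen _ hall _
      simp only [bScan]
      rw [res_all_dead arr dead hlen (fun j hj => hall j (Nat.zero_le j) hj)]
      rw [solveA_loop]
      simp
  | succ i ih =>
      intro dead head total hlen hile hall hinv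
      have hilt : i < arr.length := by omega
      simp only [bScan]
      by_cases hdead : dead.getD i false = true
      · rw [if_pos hdead]
        refine ih dead head total hlen (by omega) ?_ hinv
        intro j hj hj'
        rcases Nat.eq_or_lt_of_le hj with h | h
        · rw [← h]; exact hdead
        · exact hall j h hj'
      · rw [if_neg hdead]
        have hdf : dead.getD i false = false := by simpa using hdead
        set x := arr.getD i 0 with hx
        set dead1 := dead.set i true with hdead1
        have hlen1 : dead1.length = arr.length := by simp [hdead1, hlen]
        have hall1 : ∀ j, i ≤ j → j < arr.length → dead1.getD j false = true := by
          intro j hj hj'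
          rcases Nat.eq_or_lt_of_le hj with h | h
          · rw [← h, hdead1, List.getD_eq_getElem?_getD, List.getElem?_set]
            simp [hlen ▸ hilt]
          · exact dead_mono i (hall j h hj')
        have hinv1 : HeadInv arr dead1 head := fun v k hk hkidx => dead_mono i (hinv v k hk hkidx)
        have hres : resid arr dead = resid arr dead1 ++ [x] :=
          res_last arr dead i hlen hilt hdf (fun j hj hj' => hall j hj hj')
        rw [hres, A_step]
        cases hg : (buildPos arr 0 PySem.Dict.empty).get? (x - 1) with
        | none =>
            have hnotin : x - 1 ∉ arr := (pos_get?_none arr (x - 1)).1 hg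
            have hrt : removeTry (resid arr dead1) (x - 1) = resid arr dead1 := by
              unfold removeTry
              rw [(PySem.List.remove?_eq_none_iff _ _).2 (fun hmem => hnotin (res_mem hmem))]
            rw [hrt]
            exact ih dead1 head (total + x) hlen1 (by omega) hall1 hinv1
        | some lst =>
            have hlst : lst = idxs arr (x - 1) := by
              have h1 := pos_getD_eq arr (x - 1)
              rw [PySem.Dict.getD_of_get?_eq_some _ [] hg] at h1
              exact h1
            subst hlst
            dsimp only
            set L := idxs arr (x - 1) with hL
            set hh := skipDead L dead1 (head.getD (x - 1) 0) with hhdef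
            have hpre : ∀ k, ∀ hk : k < L.length, k < hh →
                dead1.getD L[k] false = true := by
              intro k hk hkh
              by_cases hk0 : k < head.getD (x - 1) 0
              · exact hinv1 (x - 1) k hk0 hk
              · exact skip_dead L dead1 _ k (by omega) hkh hk
            by_cases hlenh : hh < L.length
            · rw [dif_pos hlenh]
              have hjmem : L[hh] ∈ L := List.getElem_mem hlenh
              have hjprop := (idxs_mem arr (x - 1) L[hh]).1 hjmem
              have halivej : dead1.getD L[hh] false = false := skip_alive L dead1 _ hlenh
              have hfirst : ∀ k, k < L[hh] → arr.getD k 0 = x - 1 →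
                  dead1.getD k false = true := by
                intro k hkj hkv
                have hkmem : k ∈ L := (idxs_mem arr (x - 1) k).2 ⟨by omega, hkv⟩
                obtain ⟨k', hk', hk'eq⟩ := List.mem_iff_getElem.1 hkmem
                have hk'h : k' < hh := by
                  by_contra hge0
                  have hge : hh ≤ k' := Nat.le_of_not_lt hge0
                  rcases Nat.eq_or_lt_of_le hge with he | hlt'
                  · have hEq : L[hh] = L[k'] := by simp [he]
                    rw [hk'eq] at hEq
                    omega
                  · have hlt2 := (List.pairwise_iff_getElem.1 (idxs_sorted arr (x - 1)))
                      hh k' hlenh hk' hlt'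
                    simp only [← hL] at hlt2
                    rw [hk'eq] at hlt2
                    omega
                have := hpre k' hk' hk'h
                rw [hk'eq] at this
                exact this
              have hrem := res_remove arr dead1 L[hh] (x - 1) hlen1 hjprop.1 halivej
                hjprop.2 hfirst
              have hrt : removeTry (resid arr dead1) (x - 1)
                  = resid arr (dead1.set L[hh] true) := by
                unfold removeTry
                rw [hrem]
              rw [hrt]
              refine ih _ _ _ (by simp [hlen1]) (by omega)
                (fun j hj hj' => dead_mono _ (hall1 j hj hj')) ?_
              intro v k hk hkidx
              by_cases hvx : v = x - 1
              · subst hvx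
                rw [PySem.Dict.getD_insert, if_pos rfl] at hk
                by_cases hkh : k < hh
                · exact dead_mono _ (hpre k hkidx hkh)
                · have hkeq : k = hh := by omega
                  subst hkeq
                  rw [List.getD_eq_getElem?_getD, List.getElem?_set]
                  have hjd : L[hh] < dead1.length := by rw [hlen1]; exact hjprop.1
                  simp [← hL, hjd]
              · rw [PySem.Dict.getD_insert, if_neg hvx] at hk
                exact dead_mono _ (hinv1 v k hk hkidx)
            · rw [dif_neg hlenh]
              have halldead : ∀ j < arr.length, arr.getD j 0 = x - 1 →
                  dead1.getD j false = true := by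
                intro j hj hjv
                have hjmem : j ∈ L := (idxs_mem arr (x - 1) j).2 ⟨hj, hjv⟩
                obtain ⟨k', hk', hk'eq⟩ := List.mem_iff_getElem.1 hjmem
                have := hpre k' hk' (by omega)
                rw [hk'eq] at this
                exact this
              have hrt : removeTry (resid arr dead1) (x - 1) = resid arr dead1 := by
                unfold removeTry
                rw [(PySem.List.remove?_eq_none_iff _ _).2
                  (res_none arr dead1 (x - 1) halldead)]
              rw [hrt]
              refine ih dead1 (head.insert (x - 1) hh) (total + x) hlen1 (by omega) hall1 ?_
              intro v k hk hkidx
              by_cases hvx : v = x - 1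
              · subst hvx
                rw [PySem.Dict.getD_insert, if_pos rfl] at hk
                exact hpre k hkidx hk
              · rw [PySem.Dict.getD_insert, if_neg hvx] at hk
                exact hinv1 v k hk hkidx

-- ===== VERDICT (by name: the statement is the Claim_ definition above) =====
theorem solve_spec : Claim_equal_solve := by
  intro n arr _
  unfold Spec_solve
  have h := main_inv arr arr.length (List.replicate arr.length false) PySem.Dict.empty 0
    (by simp) (le_refl _) (by intro j hj hj'; omega)
    (by intro v k hk; simp [PySem.Dict.getD_empty] at hk)
  rw [solve, solve_alt, h, resid_replicate]
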